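-- pv_equiv track=rewrite | github.com/BornaBejuk/bioinf-kiwi | python/grouping_paths.py | divide_paths_into_anchor_groups
-- ===== SOURCE A (Python) =====
-- def divide_paths_into_anchor_groups(list_of_list_of_paths):
--     '''Takes as input an object that is in format:
--         [ [ [path1], ..., [pathN] ],
--           [ [path1]], ...,[pathN] ],
--           ...
--           [ [path1], ...,[pathN] ] ]
--     where e.g. path1 == ['ctg1', 'read1', 'ctg2']
--     Same as before, paths do not have to be inside list. i.e. input should probably look like
--     [ [ path1, ..., pathN],
--       [ path1, ..., pathN],
--       ...
--       [ path1, ..., pathN] ]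
--      That syntax was left over from first two approaches.
--      That can be changed if wanted when rewriting in cpp.
--
--     Method outputs a map, e.g.
--         {'ctg1ctg2': [[path1],..., [pathN]],
--          'ctg1ctg3': [[path1],..., [pathN]],
--          'ctg2ctg3': [[path1],..., [pathN]]}
--     The goal of the method is to group all paths so that paths between same contigs are put together.
--     This method could be modified so that the keys are tuples (ctg1, ctg2)
--     instead of a string 'ctgctg2'.
--     '''
--     map_of_paths = dict()
--     for l in list_of_list_of_paths:
--         for p in l:
--             path = p[0]
--             start_contig = path[0]
--             end_contig = path[-1]
--             contigs = sorted([start_contig, end_contig])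
--             key = contigs[0] + contigs[1]
--             if key not in map_of_paths:
--                 map_of_paths[key] = []
--                 map_of_paths[key].append(path)
--             else:
--                 map_of_paths[key].append(path)
--     return map_of_paths
-- ===== SOURCE B (Python) =====
-- def divide_paths_into_anchor_groups(list_of_list_of_paths):
--     # Staged pipeline instead of incremental hash grouping: flatten all paths,
--     # compute each path's anchor key once, take the distinct keys in first-
--     # occurrence order, and build each group by filtering the keyed list.
--     paths = [p[0] for group in list_of_list_of_paths for p in group]
--     keyed = [(''.join(sorted((path[0], path[-1]))), path) for path in paths]
--     return {k: [path for k2, path in keyed if k2 == k]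
--             for k in dict.fromkeys(k for k, _ in keyed)}
-- ===== Notes on version B (the rewrite author's own statement) =====
-- stated objective: alternative
-- what changed: replaces A's single-pass hash-accumulation (membership-tested dict of growing lists) with a staged pipeline: flatten to a keyed path list, take distinct keys in first-occurrence order, and build each group by a per-key filter over the keyed list
import Mathlib
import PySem

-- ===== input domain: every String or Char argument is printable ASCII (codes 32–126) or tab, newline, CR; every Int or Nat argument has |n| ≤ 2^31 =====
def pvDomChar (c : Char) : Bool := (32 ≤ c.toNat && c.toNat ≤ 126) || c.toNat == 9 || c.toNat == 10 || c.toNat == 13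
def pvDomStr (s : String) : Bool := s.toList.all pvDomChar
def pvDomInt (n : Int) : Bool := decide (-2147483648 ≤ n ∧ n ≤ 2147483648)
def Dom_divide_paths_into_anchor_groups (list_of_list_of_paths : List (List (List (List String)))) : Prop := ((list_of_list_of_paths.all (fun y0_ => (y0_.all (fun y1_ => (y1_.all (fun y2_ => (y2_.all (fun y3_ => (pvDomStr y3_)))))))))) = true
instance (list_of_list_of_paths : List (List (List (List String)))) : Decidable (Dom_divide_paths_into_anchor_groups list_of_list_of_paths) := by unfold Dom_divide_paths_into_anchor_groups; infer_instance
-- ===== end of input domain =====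

-- B replaces A's incremental dict-of-lists accumulation with a staged pipeline
-- (flatten, key, ordered distinct keys, per-key filter); same return value, no speed claim.

-- ===== PORT A =====
def divide_paths_into_anchor_groups (list_of_list_of_paths : List (List (List (List String)))) : List (String × List (List String)) :=
  (list_of_list_of_paths.foldl (fun map_of_paths l =>
    l.foldl (fun map_of_paths p =>
      let path := PySem.List.pyGetD p 0 []
      let start_contig := PySem.List.pyGetD path 0 ""
      let end_contig := PySem.List.pyGetD path (-1) ""
      let contigs := PySem.List.sorted [start_contig, end_contig] (fun x => x) false
      let key := PySem.List.pyGetD contigs 0 "" ++ PySem.List.pyGetD contigs 1 ""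
      if map_of_paths.contains key then
        map_of_paths.modify key [] (fun v => v ++ [path])
      else
        -- map_of_paths[key] = [] ; map_of_paths[key].append(path)
        (map_of_paths.insert key []).modify key [] (fun v => v ++ [path]))
      map_of_paths) PySem.Dict.empty).items

-- ===== PORT B =====  (transliteration of Source B)
def divide_paths_into_anchor_groups_alt (list_of_list_of_paths : List (List (List (List String)))) : List (String × List (List String)) :=
  -- paths = [p[0] for group in list_of_list_of_paths for p in group]
  let paths := list_of_list_of_paths.flatMap (fun group => group.map (fun p => PySem.List.pyGetD p 0 []))
  -- keyed = [(''.join(sorted((path[0], path[-1]))), path) for path in paths]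
  let keyed := paths.map (fun path =>
    (PySem.Str.join "" (PySem.List.sorted [PySem.List.pyGetD path 0 "", PySem.List.pyGetD path (-1) ""] (fun x => x) false), path))
  -- {k: [path for k2, path in keyed if k2 == k] for k in dict.fromkeys(k for k, _ in keyed)}
  ((PySem.List.dedup (keyed.map (fun q => q.1))).foldl
      (fun d k => d.insert k ((keyed.filter (fun q => q.1 == k)).map (fun q => q.2)))
      PySem.Dict.empty).items

-- ===== PRECONDITION & SPEC =====
-- Pre_ excludes exactly the inputs where Python A raises IndexError: an empty
-- inner list p (p[0]) or an empty path (path[0] / path[-1]).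
def Pre_divide_paths_into_anchor_groups (list_of_list_of_paths : List (List (List (List String)))) : Prop :=
  ∀ l ∈ list_of_list_of_paths, ∀ p ∈ l, p ≠ [] ∧ p.headD [] ≠ []
instance (list_of_list_of_paths : List (List (List (List String)))) : Decidable (Pre_divide_paths_into_anchor_groups list_of_list_of_paths) := by unfold Pre_divide_paths_into_anchor_groups; infer_instance
def pvWitness_divide_paths_into_anchor_groups : List (List (List (List String))) :=
  [[[["c2", "r1", "c1"]], [["c1", "r2", "c2"]]], [[["c1", "r3", "c3"]]]]
def Spec_divide_paths_into_anchor_groups (list_of_list_of_paths : List (List (List (List String)))) (out : List (String × List (List String))) : Prop := out = divide_paths_into_anchor_groups_alt list_of_list_of_paths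
instance (list_of_list_of_paths : List (List (List (List String)))) (out : List (String × List (List String))) : Decidable (Spec_divide_paths_into_anchor_groups list_of_list_of_paths out) := by unfold Spec_divide_paths_into_anchor_groups; infer_instance

-- ===== CLAIM (what is proved, stated in full; the proofs are below) =====
def Claim_equal_divide_paths_into_anchor_groups : Prop := ∀ (list_of_list_of_paths : List (List (List (List String)))), Dom_divide_paths_into_anchor_groups list_of_list_of_paths → Pre_divide_paths_into_anchor_groups list_of_list_of_paths → Spec_divide_paths_into_anchor_groups list_of_list_of_paths (divide_paths_into_anchor_groups list_of_list_of_paths)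

-- ===== LEMMAS AND PROOFS =====

-- the key A computes for an inner element p
def pvKeyOf (p : List (List String)) : String :=
  let path := PySem.List.pyGetD p 0 []
  let contigs := PySem.List.sorted [PySem.List.pyGetD path 0 "", PySem.List.pyGetD path (-1) ""] (fun x => x) false
  PySem.List.pyGetD contigs 0 "" ++ PySem.List.pyGetD contigs 1 ""

-- A's loop body is exactly a dict-modify (the `key not in map` branch inserts [] first,
-- which modify does anyway)
theorem pvStep_eq_modify (d : PySem.Dict String (List (List String))) (key : String) (path : List String) :
    (if d.contains key then d.modify key [] (fun v => v ++ [path])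
     else (d.insert key []).modify key [] (fun v => v ++ [path]))
    = d.modify key [] (fun v => v ++ [path]) := by
  by_cases h : d.contains key
  · simp [h]
  · have h' : d.contains key = false := by simpa using h
    simp [h', PySem.Dict.modify, PySem.Dict.getD_insert_self, PySem.Dict.insert_insert_self,
      PySem.Dict.getD_of_not_contains (h := h')]

-- A as one fold over the flattened pair list
theorem pvA_eq_pairs_fold (xss : List (List (List (List String)))) :
    divide_paths_into_anchor_groups xss
    = (((xss.flatten.map (fun p => (pvKeyOf p, PySem.List.pyGetD p 0 []))).foldl
        (fun d q => d.modify q.1 [] (fun v => v ++ [q.2])) PySem.Dict.empty)).items := by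
  unfold divide_paths_into_anchor_groups
  rw [← List.foldl_flatten, List.foldl_map]
  congr 1
  apply PySem.List.foldl_congr_mem
  intro d p _
  simpa [pvKeyOf] using pvStep_eq_modify d (pvKeyOf p) (PySem.List.pyGetD p 0 [])

theorem pvUpdate_nil (xs : List String) :
    PySem.Set.update ([] : PySem.Set String) xs = PySem.List.dedup xs := by
  simp [pysem]

-- A's grouping fold from the empty dict, described entry-wise
theorem pvFold_items (ps : List (String × List String)) :
    ((ps.foldl (fun d q => d.modify q.1 [] (fun v => v ++ [q.2])) PySem.Dict.empty)).items
    = (PySem.List.dedup (ps.map (fun q => q.1))).map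
        (fun k => (k, (ps.filter (fun q => q.1 == k)).map (fun q => q.2))) := by
  have hnd : ((ps.foldl (fun d q => d.modify q.1 [] (fun v => v ++ [q.2])) PySem.Dict.empty)).keys.Nodup :=
    PySem.Dict.nodup_keys_foldl_modify_key ps (fun q => q.1) [] (fun _ q v => v ++ [q.2]) _
      (by rw [PySem.Dict.keys_empty]; exact List.nodup_nil)
  have hkeys : ((ps.foldl (fun d q => d.modify q.1 [] (fun v => v ++ [q.2])) PySem.Dict.empty)).keys
      = PySem.List.dedup (ps.map (fun q => q.1)) := by
    rw [PySem.Dict.keys_foldl_modify_key ps (fun q => q.1) [] (fun _ q v => v ++ [q.2]) PySem.Dict.empty,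
      PySem.Dict.keys_empty, pvUpdate_nil]
  rw [PySem.Dict.items_eq_map_keys _ hnd [], hkeys]
  apply List.map_congr_left
  intro k _
  have h := PySem.Dict.getD_foldl_modify_append ps PySem.Dict.empty k
  rw [PySem.Dict.getD_empty, List.nil_append] at h
  rw [h]

-- ''.join of a two-element string list is their concatenation
theorem pvJoin_pair (s : List String) (h : s.length = 2) :
    PySem.Str.join "" s = PySem.List.pyGetD s 0 "" ++ PySem.List.pyGetD s 1 "" := by
  match s, h with
  | [u, v], _ =>
    simp [PySem.Str.join, PySem.Chars.join_cons_cons, PySem.Chars.join_singleton,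
      PySem.List.pyGetD, PySem.List.pyGet?, PySem.List.pyIdx?]

-- B's key equals A's key
theorem pvKey_join (path : List String) :
    PySem.Str.join "" (PySem.List.sorted [PySem.List.pyGetD path 0 "", PySem.List.pyGetD path (-1) ""] (fun x => x) false)
    = PySem.List.pyGetD (PySem.List.sorted [PySem.List.pyGetD path 0 "", PySem.List.pyGetD path (-1) ""] (fun x => x) false) 0 ""
      ++ PySem.List.pyGetD (PySem.List.sorted [PySem.List.pyGetD path 0 "", PySem.List.pyGetD path (-1) ""] (fun x => x) false) 1 "" := by
  apply pvJoin_pair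
  rw [PySem.List.length_sorted]
  rfl

-- B's dict comprehension over the nodup key list, entry-wise
theorem pvB_items (keyed : List (String × List String)) :
    ((PySem.List.dedup (keyed.map (fun q => q.1))).foldl
      (fun d k => d.insert k ((keyed.filter (fun q => q.1 == k)).map (fun q => q.2)))
      PySem.Dict.empty).items
    = (PySem.List.dedup (keyed.map (fun q => q.1))).map
        (fun k => (k, (keyed.filter (fun q => q.1 == k)).map (fun q => q.2))) := by
  rw [PySem.Dict.items_foldl_insert_fresh
      (l := PySem.List.dedup (keyed.map (fun q => q.1)))
      (k := fun k => k)
      (v := fun k => (keyed.filter (fun q => q.1 == k)).map (fun q => q.2))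
      (d := PySem.Dict.empty)
      (by intro a _; simp [PySem.Dict.contains_empty])
      (by simpa using PySem.List.nodup_dedup (keyed.map (fun q => q.1)))]
  simp only [show (PySem.Dict.empty : PySem.Dict String (List (List String))).items = [] from rfl,
    List.nil_append]

-- ===== VERDICT (by name: the statement is the Claim_ definition above) =====
theorem divide_paths_into_anchor_groups_spec : Claim_equal_divide_paths_into_anchor_groups := by
  intro xss _ _
  show divide_paths_into_anchor_groups xss = divide_paths_into_anchor_groups_alt xss
  rw [pvA_eq_pairs_fold, pvFold_items]
  have hkeyed : (xss.flatMap (fun group => group.map (fun p => PySem.List.pyGetD p 0 []))).map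
      (fun path =>
        (PySem.Str.join "" (PySem.List.sorted [PySem.List.pyGetD path 0 "", PySem.List.pyGetD path (-1) ""] (fun x => x) false), path))
      = xss.flatten.map (fun p => (pvKeyOf p, PySem.List.pyGetD p 0 [])) := by
    simp only [List.flatMap_def, List.map_flatten, List.map_map, Function.comp_def]
    apply congrArg List.flatten
    apply List.map_congr_left
    intro l _
    apply List.map_congr_left
    intro p _
    show (PySem.Str.join "" (PySem.List.sorted [PySem.List.pyGetD (PySem.List.pyGetD p 0 []) 0 "", PySem.List.pyGetD (PySem.List.pyGetD p 0 []) (-1) ""] (fun x => x) false), PySem.List.pyGetD p 0 [])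
        = (pvKeyOf p, PySem.List.pyGetD p 0 [])
    rw [pvKey_join]
    rfl
  show _ = divide_paths_into_anchor_groups_alt xss
  unfold divide_paths_into_anchor_groups_alt
  simp only [hkeyed, pvB_items]
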